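-- pv_equiv track=rewrite | github.com/Dehan001/Protein-Dataset | step3_select_final_reps_by_ss.py | build_owner_mapping
-- ===== SOURCE A (Python) =====
-- from typing import Dict, Tuple, List, Set
--
-- def build_owner_mapping(raw_clusters: Dict[str, Set[str]], valid_ids: Set[str]) -> Dict[str, str]:
--     """
--     Critical fix: convert rep->members into a SINGLE owner rep per member.
--     Otherwise if your TSV is noisy (or if you later add singletons), you might keep too many.
--     Rule: if a member appears under multiple reps, assign it to lexicographically smallest rep.
--     """
--     owner: Dict[str, str] = {}
--
--     for rep in sorted(raw_clusters.keys()):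
--         # skip rep not in our fasta universe
--         if rep not in valid_ids:
--             continue
--         for mem in raw_clusters[rep]:
--             if mem not in valid_ids:
--                 continue
--             if mem not in owner or rep < owner[mem]:
--                 owner[mem] = rep
--
--     return owner
-- ===== SOURCE B (Python) =====
-- def build_owner_mapping(raw_clusters, valid_ids):
--     # Inverted index: member -> all valid reps that list it (reps scanned in
--     # sorted order so the result dict's key order matches); then one min()
--     # reduction per member replaces the running-minimum comparison.
--     candidates = {}
--     for rep in sorted(raw_clusters.keys()):
--         if rep in valid_ids:
--             for mem in raw_clusters[rep]:
--                 if mem in valid_ids: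
--                     candidates.setdefault(mem, []).append(rep)
--     return {mem: min(reps) for mem, reps in candidates.items()}
-- ===== Notes on version B (the rewrite author's own statement) =====
-- stated objective: alternative
-- what changed: A keeps a running minimum (conditional overwrite 'rep < owner[mem]') while scanning; B builds an inverted index member -> list of owning reps in one pass and then takes min(reps) per member in a separate reduction.
import Mathlib
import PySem

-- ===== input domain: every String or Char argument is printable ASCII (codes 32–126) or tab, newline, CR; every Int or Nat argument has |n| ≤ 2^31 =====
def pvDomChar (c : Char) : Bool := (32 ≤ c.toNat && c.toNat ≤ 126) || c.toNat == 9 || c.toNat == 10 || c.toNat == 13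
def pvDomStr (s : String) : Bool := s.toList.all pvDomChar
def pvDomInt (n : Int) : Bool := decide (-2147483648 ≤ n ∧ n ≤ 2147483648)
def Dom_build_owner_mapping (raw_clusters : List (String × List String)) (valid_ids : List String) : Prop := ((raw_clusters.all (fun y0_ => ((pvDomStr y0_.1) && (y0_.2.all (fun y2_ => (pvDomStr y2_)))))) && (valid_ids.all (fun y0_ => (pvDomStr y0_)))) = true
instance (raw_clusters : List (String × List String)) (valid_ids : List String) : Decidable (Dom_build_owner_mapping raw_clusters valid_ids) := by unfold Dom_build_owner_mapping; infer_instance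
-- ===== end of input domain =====

-- B replaces A's running-minimum overwrite by an inverted index (member -> list of owning reps)
-- reduced by one min() per member afterwards ("alternative"; equivalence is about the return value).

-- ===== PORT A =====
def build_owner_mapping (raw_clusters : List (String × List String)) (valid_ids : List String) : List (String × String) :=
  let d := PySem.Dict.ofList raw_clusters
  let vs := PySem.Set.ofList valid_ids
  ((PySem.List.sorted d.keys (fun k => k) false).foldl (fun owner rep =>
    if PySem.Set.contains vs rep then
      ((d.get? rep).getD []).foldl (fun owner mem =>
        if PySem.Set.contains vs mem then
          match owner.get? mem with
          | none => owner.insert mem rep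
          | some ov => if rep < ov then owner.insert mem rep else owner
        else owner) owner
    else owner) PySem.Dict.empty).items

-- ===== PORT B =====
-- min(reps) on a nonempty list of strings (the .getD "" default is never reached on the built lists)
def pvMin1 (l : List String) : String := (PySem.List.min? l (fun x => x)).getD ""

def build_owner_mapping_alt (raw_clusters : List (String × List String)) (valid_ids : List String) : List (String × String) :=
  let d := PySem.Dict.ofList raw_clusters
  let vs := PySem.Set.ofList valid_ids
  let cand := (PySem.List.sorted d.keys (fun k => k) false).foldl (fun cand rep =>
    if PySem.Set.contains vs rep then
      ((d.get? rep).getD []).foldl (fun cand mem =>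
        if PySem.Set.contains vs mem then cand.modify mem [] (· ++ [rep]) else cand) cand
    else cand) PySem.Dict.empty
  cand.items.map (fun p => (p.1, pvMin1 p.2))

-- ===== PRECONDITION & SPEC =====
def Spec_build_owner_mapping (raw_clusters : List (String × List String)) (valid_ids : List String) (out : List (String × String)) : Prop := out = build_owner_mapping_alt raw_clusters valid_ids
instance (raw_clusters : List (String × List String)) (valid_ids : List String) (out : List (String × String)) : Decidable (Spec_build_owner_mapping raw_clusters valid_ids out) := by unfold Spec_build_owner_mapping; infer_instance

-- ===== CLAIM (what is proved, stated in full; the proofs are below) =====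
def Claim_equal_build_owner_mapping : Prop := ∀ (raw_clusters : List (String × List String)) (valid_ids : List String), Dom_build_owner_mapping raw_clusters valid_ids → Spec_build_owner_mapping raw_clusters valid_ids (build_owner_mapping raw_clusters valid_ids)

-- ===== LEMMAS AND PROOFS =====

-- B's candidates dict viewed through min() is A's owner dict
def pvToOwner (c : PySem.Dict String (List String)) : PySem.Dict String String :=
  PySem.Dict.mk (c.items.map (fun p => (p.1, pvMin1 p.2)))

theorem pvMin1_singleton (x : String) : pvMin1 [x] = x := by
  simp [pvMin1, PySem.List.min?]

theorem pvMin1_append (l : List String) (r : String) (h : l ≠ []) :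
    pvMin1 (l ++ [r]) = if r < pvMin1 l then r else pvMin1 l := by
  obtain ⟨x, t, rfl⟩ := List.exists_cons_of_ne_nil h
  simp only [pvMin1, List.cons_append, PySem.List.min?_id_cons, Option.getD_some,
    List.foldl_append, List.foldl_cons, List.foldl_nil]
  by_cases hlt : r < List.foldl min x t
  · rw [min_eq_right hlt.le, if_pos hlt]
  · rw [min_eq_left (not_lt.mp hlt), if_neg hlt]

theorem pvToOwner_get? (l : List (String × List String)) (k : String) :
    (pvToOwner (PySem.Dict.mk l)).get? k = ((PySem.Dict.mk l).get? k).map pvMin1 := by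
  induction l with
  | nil => simp [pvToOwner, PySem.Dict.get?]
  | cons p t ih =>
    obtain ⟨a, b⟩ := p
    simp only [pvToOwner] at ih ⊢
    simp only [List.map_cons, PySem.Dict.get?_mk_cons]
    split_ifs with h
    · rfl
    · exact ih

theorem pvToOwner_get?' (c : PySem.Dict String (List String)) (k : String) :
    (pvToOwner c).get? k = (c.get? k).map pvMin1 := pvToOwner_get? c.items k

-- one inner-loop step (valid member) preserves the simulation and the invariants
theorem pvStep (c : PySem.Dict String (List String)) (rep mem : String)
    (hnd : c.keys.Nodup) (hne : ∀ p ∈ c.items, p.2 ≠ []) :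
    (pvToOwner (c.modify mem [] (· ++ [rep])) =
      (match (pvToOwner c).get? mem with
       | none => (pvToOwner c).insert mem rep
       | some ov => if rep < ov then (pvToOwner c).insert mem rep else (pvToOwner c)))
    ∧ (c.modify mem [] (· ++ [rep])).keys.Nodup
    ∧ (∀ p ∈ (c.modify mem [] (· ++ [rep])).items, p.2 ≠ []) := by
  have hmod : c.modify mem [] (· ++ [rep]) = c.insert mem (c.getD mem [] ++ [rep]) := rfl
  by_cases h : c.contains mem = true
  · -- key present: value extended in place; owner updated in place iff rep is a new minimum
    obtain ⟨l, hl⟩ : ∃ l, c.get? mem = some l := by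
      rcases hg : c.get? mem with _ | l
      · rw [PySem.Dict.contains_eq_isSome_get?, hg] at h; simp at h
      · exact ⟨l, rfl⟩
    have hlmem : (mem, l) ∈ c.items := PySem.Dict.mem_items_of_get?_eq_some c hl
    have hlne : l ≠ [] := hne _ hlmem
    have hgd : c.getD mem [] = l := PySem.Dict.getD_of_get?_eq_some c [] hl
    have hoget : (pvToOwner c).get? mem = some (pvMin1 l) := by
      rw [pvToOwner_get?', hl]; rfl
    have hocont : (pvToOwner c).contains mem = true := by
      rw [PySem.Dict.contains_eq_isSome_get?, hoget]; rfl
    refine ⟨?_, ?_, ?_⟩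
    · rw [hoget]
      rw [show (match some (pvMin1 l) with
            | none => (pvToOwner c).insert mem rep
            | some ov => if rep < ov then (pvToOwner c).insert mem rep else pvToOwner c)
          = if rep < pvMin1 l then (pvToOwner c).insert mem rep else pvToOwner c from rfl]
      apply PySem.Dict.ext
      rw [hmod, hgd]
      split_ifs with hlt
      · rw [PySem.Dict.items_insert_of_contains _ rep hocont]
        simp only [pvToOwner, PySem.Dict.items_insert_of_contains c (l ++ [rep]) h, List.map_map]
        apply List.map_congr_left
        intro p hp
        by_cases hk : p.1 = mem
        · have hpl : c.get? p.1 = some p.2 := PySem.Dict.get?_of_mem_items c hp hnd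
          rw [hk, hl] at hpl
          have hval : p.2 = l := (Option.some_injective _ hpl).symm
          simp only [Function.comp_apply, hk, beq_self_eq_true, if_pos, hval]
          simp [pvMin1_append l rep hlne, hlt]
        · simp [Function.comp_apply, hk]
      · simp only [pvToOwner, PySem.Dict.items_insert_of_contains c (l ++ [rep]) h, List.map_map]
        apply List.map_congr_left
        intro p hp
        by_cases hk : p.1 = mem
        · have hpl : c.get? p.1 = some p.2 := PySem.Dict.get?_of_mem_items c hp hnd
          rw [hk, hl] at hpl
          have hval : p.2 = l := (Option.some_injective _ hpl).symm
          have hmin := pvMin1_append l rep hlne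
          rw [if_neg hlt] at hmin
          simp [Function.comp_apply, hk, hval, hmin]
        · simp [Function.comp_apply, hk]
    · rw [hmod]; exact PySem.Dict.nodup_keys_insert c mem _ hnd
    · rw [hmod]
      intro p hp
      rw [PySem.Dict.items_insert_of_contains c _ h] at hp
      obtain ⟨q, hq, hqe⟩ := List.mem_map.mp hp
      by_cases hk : q.1 = mem
      · simp only [hk, beq_self_eq_true, if_pos] at hqe
        subst hqe; simp [hgd]
      · simp only [hk, beq_iff_eq] at hqe
        subst hqe; exact hne q hq
  · -- key absent: both dicts append a fresh entry at the end
    have h' : c.contains mem = false := by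
      cases hc : c.contains mem
      · rfl
      · exact absurd hc h
    have hg : c.get? mem = none := by
      rw [PySem.Dict.contains_eq_isSome_get?] at h'
      cases hg : c.get? mem
      · rfl
      · rw [hg] at h'; simp at h'
    have hgd : c.getD mem [] = [] := PySem.Dict.getD_of_get?_eq_none c [] hg
    have hoget : (pvToOwner c).get? mem = none := by
      rw [pvToOwner_get?', hg]; rfl
    have hocont : (pvToOwner c).contains mem = false := by
      rw [PySem.Dict.contains_eq_isSome_get?, hoget]; rfl
    refine ⟨?_, ?_, ?_⟩
    · rw [hoget]
      apply PySem.Dict.ext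
      rw [show (match (none : Option String) with
            | none => (pvToOwner c).insert mem rep
            | some ov => if rep < ov then (pvToOwner c).insert mem rep else pvToOwner c)
          = (pvToOwner c).insert mem rep from rfl]
      rw [PySem.Dict.items_insert_of_not_contains _ rep hocont, hmod, hgd]
      simp only [pvToOwner, PySem.Dict.items_insert_of_not_contains c _ h']
      simp [pvMin1_singleton]
    · rw [hmod]; exact PySem.Dict.nodup_keys_insert c mem _ hnd
    · rw [hmod]
      intro p hp
      rw [PySem.Dict.items_insert_of_not_contains c _ h'] at hp
      rcases List.mem_append.mp hp with hp | hp
      · exact hne p hp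
      · simp only [List.mem_singleton] at hp
        subst hp; simp

-- the inner loop over a cluster's members preserves the simulation
theorem pvInner (mems : List String) (rep : String) (vs : List String)
    (c : PySem.Dict String (List String))
    (hnd : c.keys.Nodup) (hne : ∀ p ∈ c.items, p.2 ≠ []) :
    (mems.foldl (fun owner mem =>
        if PySem.Set.contains vs mem then
          match owner.get? mem with
          | none => owner.insert mem rep
          | some ov => if rep < ov then owner.insert mem rep else owner
        else owner) (pvToOwner c)
      = pvToOwner (mems.foldl (fun cand mem =>
          if PySem.Set.contains vs mem then cand.modify mem [] (· ++ [rep]) else cand) c))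
    ∧ (mems.foldl (fun cand mem =>
          if PySem.Set.contains vs mem then cand.modify mem [] (· ++ [rep]) else cand) c).keys.Nodup
    ∧ (∀ p ∈ (mems.foldl (fun cand mem =>
          if PySem.Set.contains vs mem then cand.modify mem [] (· ++ [rep]) else cand) c).items, p.2 ≠ []) := by
  induction mems generalizing c with
  | nil => exact ⟨rfl, hnd, hne⟩
  | cons m t ih =>
    simp only [List.foldl_cons]
    by_cases hv : PySem.Set.contains vs m = true
    · obtain ⟨h1, h2, h3⟩ := pvStep c rep m hnd hne
      rw [if_pos hv, if_pos hv, ← h1]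
      exact ih _ h2 h3
    · rw [if_neg hv, if_neg hv]
      exact ih c hnd hne

-- the outer loop over the sorted reps preserves the simulation
theorem pvOuter (reps : List String) (vs : List String)
    (d : PySem.Dict String (List String))
    (c : PySem.Dict String (List String))
    (hnd : c.keys.Nodup) (hne : ∀ p ∈ c.items, p.2 ≠ []) :
    reps.foldl (fun owner rep =>
        if PySem.Set.contains vs rep then
          ((d.get? rep).getD []).foldl (fun owner mem =>
            if PySem.Set.contains vs mem then
              match owner.get? mem with
              | none => owner.insert mem rep
              | some ov => if rep < ov then owner.insert mem rep else owner
            else owner) owner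
        else owner) (pvToOwner c)
      = pvToOwner (reps.foldl (fun cand rep =>
          if PySem.Set.contains vs rep then
            ((d.get? rep).getD []).foldl (fun cand mem =>
              if PySem.Set.contains vs mem then cand.modify mem [] (· ++ [rep]) else cand) cand
          else cand) c) := by
  induction reps generalizing c with
  | nil => rfl
  | cons r t ih =>
    simp only [List.foldl_cons]
    by_cases hv : PySem.Set.contains vs r = true
    · obtain ⟨h1, h2, h3⟩ := pvInner ((d.get? r).getD []) r vs c hnd hne
      rw [if_pos hv, if_pos hv, h1]
      exact ih _ h2 h3
    · rw [if_neg hv, if_neg hv]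
      exact ih c hnd hne

-- ===== VERDICT (by name: the statement is the Claim_ definition above) =====
theorem build_owner_mapping_spec : Claim_equal_build_owner_mapping := by
  unfold Claim_equal_build_owner_mapping
  intro raw_clusters valid_ids _
  unfold Spec_build_owner_mapping build_owner_mapping build_owner_mapping_alt
  have h := pvOuter (PySem.List.sorted (PySem.Dict.ofList raw_clusters).keys (fun k => k) false)
    (PySem.Set.ofList valid_ids) (PySem.Dict.ofList raw_clusters) PySem.Dict.empty
    (by simp [PySem.Dict.empty, PySem.Dict.keys]) (by simp [PySem.Dict.empty])
  have hinit : pvToOwner PySem.Dict.empty = PySem.Dict.empty := rfl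
  rw [hinit] at h
  simp only [h, pvToOwner]
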